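-- pv_equiv track=rewrite | github.com/IBM/InspectorRAGet | converters/acebench/convert.py | parse_question
-- ===== SOURCE A (Python) =====
-- def parse_question(question: str) -> list[dict]:
--     """
--     Parse ACEBench's embedded-turn question string into a Message[].
--
--     Tool-calling tasks embed turns as:
--         "user: <text>\\nsystem: <text>\\nuser: <text>\\n"
--
--     "user:" maps to role "user"; "system:" maps to role "assistant" (it
--     represents the prior model response in context).
--
--     Agentic questions are plain strings with no prefix. If no role prefixes are
--     detected, the whole string is returned as a single user message.
--     """
--     lines = question.strip().splitlines()
--     has_prefixes = any(l.startswith("user:") or l.startswith("system:") for l in lines)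
--
--     if not has_prefixes:
--         return [{"role": "user", "content": question.strip()}]
--
--     messages: list[dict] = []
--     current_role: str | None = None
--     current_parts: list[str] = []
--
--     for line in lines:
--         if line.startswith("user:"):
--             if current_role is not None:
--                 messages.append({"role": current_role, "content": "\n".join(current_parts).strip()})
--             current_role = "user"
--             current_parts = [line[len("user:"):].strip()]
--         elif line.startswith("system:"):
--             if current_role is not None:
--                 messages.append({"role": current_role, "content": "\n".join(current_parts).strip()})
--             current_role = "assistant"
--             current_parts = [line[len("system:"):].strip()]
--         else:
--             if current_role is not None:
--                 current_parts.append(line)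
--
--     if current_role is not None and current_parts:
--         messages.append({"role": current_role, "content": "\n".join(current_parts).strip()})
--
--     return [m for m in messages if m.get("content")]
-- ===== SOURCE B (Python) =====
-- def parse_question(question: str) -> list[dict]:
--     """Recursive-descent re-implementation: drop lines before the first role
--     prefix, then repeatedly take one prefix line plus its continuation block
--     (takeWhile/dropWhile) and render each block directly."""
--     text = question.strip()
--     lines = text.splitlines()
--
--     def prefix_of(line):
--         if line.startswith("user:"):
--             return "user", line[len("user:"):].strip()
--         if line.startswith("system:"):
--             return "assistant", line[len("system:"):].strip()
--         return None
--
--     # skip anything before the first role prefix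
--     i = 0
--     while i < len(lines) and prefix_of(lines[i]) is None:
--         i += 1
--     if i == len(lines):
--         return [{"role": "user", "content": text}]
--
--     messages = []
--     while i < len(lines):
--         role, first = prefix_of(lines[i])
--         j = i + 1
--         while j < len(lines) and prefix_of(lines[j]) is None:
--             j += 1
--         content = "\n".join([first] + lines[i + 1:j]).strip()
--         if content:
--             messages.append({"role": role, "content": content})
--         i = j
--     return messages
-- ===== Notes on version B (the rewrite author's own statement) =====
-- stated objective: alternative
-- what changed: A's single-pass mutable state machine (current_role/current_parts/messages with flush-on-prefix and a trailing flush plus a final filter) is replaced by a block decomposition: skip to the first prefix line, then repeatedly take one prefix line with its takeWhile continuation block and render/filter each block directly, recursing on the dropWhile remainder.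
import Mathlib
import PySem

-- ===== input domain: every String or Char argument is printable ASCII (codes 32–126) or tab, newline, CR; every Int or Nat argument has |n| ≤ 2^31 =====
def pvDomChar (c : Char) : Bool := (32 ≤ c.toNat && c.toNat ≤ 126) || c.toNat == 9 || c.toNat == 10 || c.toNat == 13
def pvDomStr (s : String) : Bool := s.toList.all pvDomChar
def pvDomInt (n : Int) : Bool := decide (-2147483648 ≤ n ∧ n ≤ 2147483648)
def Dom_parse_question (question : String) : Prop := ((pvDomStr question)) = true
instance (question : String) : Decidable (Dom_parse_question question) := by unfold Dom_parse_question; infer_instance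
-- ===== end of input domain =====

-- B replaces A's incremental role/parts/messages state machine by a recursive
-- take-one-block-at-a-time decomposition (dropWhile to the first prefix line,
-- then takeWhile/dropWhile per block); objective: alternative decomposition.

-- a message dict {"role": r, "content": c} (shared literal constructor)
def pvMsg (r c : String) : List (String × String) := [("role", r), ("content", c)]

-- m.get("content") with a "" default: first binding of "content" (exact for these two-key dicts)
def pvGetContent (m : List (String × String)) : String :=
  ((m.find? (fun p => p.1 == "content")).map (·.2)).getD ""

-- ===== PORT A =====
-- A's loop body: state = (current_role, current_parts, messages)
def pvStepA (st : Option String × List String × List (List (String × String))) (line : String) :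
    Option String × List String × List (List (String × String)) :=
  if PySem.Str.startswith line "user:" then
    let msgs := match st.1 with
      | some r => st.2.2 ++ [pvMsg r (PySem.Str.strip (PySem.Str.join "\n" st.2.1))]
      | none => st.2.2
    (some "user", [PySem.Str.strip (PySem.Str.slice line (some 5) none)], msgs)
  else if PySem.Str.startswith line "system:" then
    let msgs := match st.1 with
      | some r => st.2.2 ++ [pvMsg r (PySem.Str.strip (PySem.Str.join "\n" st.2.1))]
      | none => st.2.2
    (some "assistant", [PySem.Str.strip (PySem.Str.slice line (some 7) none)], msgs)
  else
    match st.1 with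
    | some _ => (st.1, st.2.1 ++ [line], st.2.2)
    | none => st

def parse_question (question : String) : List (List (String × String)) :=
  let lines := PySem.Str.splitlines (PySem.Str.strip question)
  let has_prefixes := lines.any
    (fun l => PySem.Str.startswith l "user:" || PySem.Str.startswith l "system:")
  if !has_prefixes then [pvMsg "user" (PySem.Str.strip question)]
  else
    let st := lines.foldl pvStepA (none, [], [])
    let messages := match st.1 with
      | some r =>
          if st.2.1.isEmpty then st.2.2
          else st.2.2 ++ [pvMsg r (PySem.Str.strip (PySem.Str.join "\n" st.2.1))]
      | none => st.2.2
    messages.filter (fun m => pvGetContent m != "")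

-- ===== PORT B =====
-- prefix_of(line): role and stripped remainder, or None
def pvPrefixOf (line : String) : Option (String × String) :=
  if PySem.Str.startswith line "user:" then
    some ("user", PySem.Str.strip (PySem.Str.slice line (some 5) none))
  else if PySem.Str.startswith line "system:" then
    some ("assistant", PySem.Str.strip (PySem.Str.slice line (some 7) none))
  else none

-- B's outer while-loop: take one prefix line plus its continuation block, render, recurse
def pvGroups : List String → List (List (String × String))
  | [] => []
  | l :: rest =>
    match pvPrefixOf l with
    | none => pvGroups rest
    | some (role, first) =>
      let content := PySem.Str.strip
        (PySem.Str.join "\n" (first :: rest.takeWhile (fun x => (pvPrefixOf x).isNone)))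
      (if content != "" then [pvMsg role content] else []) ++
        pvGroups (rest.dropWhile (fun x => (pvPrefixOf x).isNone))
termination_by l => l.length
decreasing_by
  · simp
  · exact Nat.lt_succ_of_le (List.length_dropWhile_le _ _)

def parse_question_alt (question : String) : List (List (String × String)) :=
  let text := PySem.Str.strip question
  let rest := (PySem.Str.splitlines text).dropWhile (fun l => (pvPrefixOf l).isNone)
  if rest.isEmpty then [pvMsg "user" text] else pvGroups rest

-- ===== PRECONDITION & SPEC =====
def Spec_parse_question (question : String) (out : List (List (String × String))) : Prop := out = parse_question_alt question
instance (question : String) (out : List (List (String × String))) : Decidable (Spec_parse_question question out) := by unfold Spec_parse_question; infer_instance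

-- ===== CLAIM (what is proved, stated in full; the proofs are below) =====
def Claim_equal_parse_question : Prop := ∀ (question : String), Dom_parse_question question → Spec_parse_question question (parse_question question)

-- ===== LEMMAS AND PROOFS =====

def pvFlush (cr : Option String) (p : List String) : List (List (String × String)) :=
  match cr with
  | some r => if p.isEmpty then [] else [pvMsg r (PySem.Str.strip (PySem.Str.join "\n" p))]
  | none => []

-- filtered messages produced by A's loop + final flush, starting with empty messages
def pvH (lines : List String) (cr : Option String) (p : List String) : List (List (String × String)) :=
  let st := lines.foldl pvStepA (cr, p, [])
  st.2.2.filter (fun m => pvGetContent m != "") ++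
    (pvFlush st.1 st.2.1).filter (fun m => pvGetContent m != "")

theorem pvGetContent_msg (r c : String) : pvGetContent (pvMsg r c) = c := by
  simp [pvGetContent, pvMsg, List.find?]

theorem pvStripJoinNil : PySem.Str.strip (PySem.Str.join "\n" ([] : List String)) = "" := by
  decide

theorem pvPrefixOf_isNone (l : String) :
    (pvPrefixOf l).isNone
      = !(PySem.Str.startswith l "user:" || PySem.Str.startswith l "system:") := by
  unfold pvPrefixOf
  cases hu : PySem.Str.startswith l "user:" <;>
    cases hs : PySem.Str.startswith l "system:" <;> simp

-- the foldl only appends to the messages component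
theorem pvFoldA_prepend (lines : List String) :
    ∀ (cr : Option String) (p : List String) (m msgs : List (List (String × String))),
    lines.foldl pvStepA (cr, p, m ++ msgs)
      = ((lines.foldl pvStepA (cr, p, msgs)).1,
         (lines.foldl pvStepA (cr, p, msgs)).2.1,
         m ++ (lines.foldl pvStepA (cr, p, msgs)).2.2) := by
  induction lines with
  | nil => intros; simp
  | cons l rest ih =>
    intro cr p m msgs
    simp only [List.foldl_cons]
    cases hu : PySem.Str.startswith l "user:" <;>
      cases hs : PySem.Str.startswith l "system:" <;>
      cases cr <;>
      simp only [pvStepA, hu, hs, Bool.false_eq_true, if_true, if_false] <;>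
      first
        | exact ih _ _ _ _
        | (rw [List.append_assoc]; exact ih _ _ _ _)

theorem pvFoldA_msgs (lines : List String) (cr : Option String) (p : List String)
    (m : List (List (String × String))) :
    lines.foldl pvStepA (cr, p, m)
      = ((lines.foldl pvStepA (cr, p, [])).1,
         (lines.foldl pvStepA (cr, p, [])).2.1,
         m ++ (lines.foldl pvStepA (cr, p, [])).2.2) := by
  simpa using pvFoldA_prepend lines cr p m []

-- one step of pvH (a mid-loop flush with empty parts has empty content: the filter drops it)
theorem pvH_cons (l : String) (rest : List String) (cr : Option String) (p : List String) :
    pvH (l :: rest) cr p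
      = (match pvPrefixOf l with
         | some (role, first) =>
             (pvFlush cr p).filter (fun m => pvGetContent m != "") ++ pvH rest (some role) [first]
         | none =>
             cr.elim (pvH rest none p) (fun r => pvH rest (some r) (p ++ [l]))) := by
  cases hu : PySem.Str.startswith l "user:" <;>
    cases hs : PySem.Str.startswith l "system:" <;>
    cases cr <;>
    simp only [pvH, pvPrefixOf, pvFlush, List.foldl_cons, pvStepA, hu, hs,
      Bool.false_eq_true, if_true, if_false, Option.elim] <;>
    first
      | rfl
      | (rw [pvFoldA_msgs];
         by_cases hp : p = [] <;>
           by_cases hc : PySem.Str.strip (PySem.Str.join "\n" p) = "" <;>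
             simp [List.filter_append, List.filter_cons, hp, hc, pvGetContent_msg,
               pvStripJoinNil])

-- A's run from a started group equals B's rendering of that group plus the remaining groups
theorem pvH_some (lines : List String) :
    ∀ (r : String) (p : List String), p ≠ [] →
    pvH lines (some r) p
      = (let c := PySem.Str.strip
           (PySem.Str.join "\n" (p ++ lines.takeWhile (fun x => (pvPrefixOf x).isNone)));
         (if c != "" then [pvMsg r c] else []))
        ++ pvGroups (lines.dropWhile (fun x => (pvPrefixOf x).isNone)) := by
  induction lines with
  | nil =>
    intro r p hp
    by_cases hc : PySem.Str.strip (PySem.Str.join "\n" p) = "" <;>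
      simp [pvH, pvFlush, pvGroups, List.isEmpty_iff, hp, pvGetContent_msg, List.filter, hc]
  | cons l rest ih =>
    intro r p hp
    rw [pvH_cons]
    cases hpre : pvPrefixOf l with
    | none =>
      simp only [List.takeWhile_cons, List.dropWhile_cons, hpre, Option.isNone_none,
        if_true, Option.elim]
      rw [ih r (p ++ [l]) (by simp)]
      simp
    | some rf =>
      obtain ⟨role, first⟩ := rf
      simp only [List.takeWhile_cons, List.dropWhile_cons, hpre, Option.isNone_some,
        Bool.false_eq_true, if_false]
      rw [ih role [first] (by simp)]
      simp only [pvGroups, hpre, pvFlush, List.isEmpty_iff, hp, List.cons_append,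
        List.nil_append, List.append_nil]
      by_cases hc : PySem.Str.strip (PySem.Str.join "\n" p) = "" <;>
        simp [hc, pvGetContent_msg, List.filter]

-- before the first prefix line A emits nothing; from the first prefix on it is pvGroups
theorem pvH_none (lines : List String) :
    ∀ (p : List String),
    pvH lines none p = pvGroups (lines.dropWhile (fun x => (pvPrefixOf x).isNone)) := by
  induction lines with
  | nil => intro p; simp [pvH, pvFlush, pvGroups]
  | cons l rest ih =>
    intro p
    rw [pvH_cons]
    cases hpre : pvPrefixOf l with
    | none =>
      simp only [List.dropWhile_cons, hpre, Option.isNone_none, Option.elim]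
      exact ih p
    | some rf =>
      obtain ⟨role, first⟩ := rf
      simp only [List.dropWhile_cons, hpre, Option.isNone_some,
        pvFlush, List.filter_nil, List.nil_append]
      rw [pvH_some rest role [first] (by simp)]
      simp [pvGroups, hpre]

-- has_prefixes is exactly "some line survives the dropWhile"
theorem pvAny_eq (lines : List String) :
    lines.any (fun l => PySem.Str.startswith l "user:" || PySem.Str.startswith l "system:")
      = !(lines.dropWhile (fun x => (pvPrefixOf x).isNone)).isEmpty := by
  induction lines with
  | nil => simp
  | cons l rest ih =>
    cases hu : PySem.Str.startswith l "user:" <;>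
      cases hs : PySem.Str.startswith l "system:" <;>
      simp only [List.any_cons, List.dropWhile_cons, pvPrefixOf_isNone, hu, hs,
        Bool.or_false, Bool.false_or, Bool.or_true, Bool.true_or, Bool.or_self,
        Bool.not_true, Bool.not_false, cond_true, cond_false, List.isEmpty_cons, ih] <;>
      simp [pvPrefixOf_isNone]

-- ===== VERDICT (by name: the statement is the Claim_ definition above) =====
theorem parse_question_spec : Claim_equal_parse_question := by
  intro question _
  unfold Spec_parse_question parse_question parse_question_alt
  simp only [pvAny_eq]
  cases h : ((PySem.Str.splitlines (PySem.Str.strip question)).dropWhile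
      (fun l => (pvPrefixOf l).isNone)).isEmpty with
  | true => simp [h]
  | false =>
    simp only [h, Bool.not_false, Bool.not_true, Bool.false_eq_true, if_false] at *
    have := pvH_none (PySem.Str.splitlines (PySem.Str.strip question)) []
    simp only [pvH, pvFlush] at this
    rw [← this]
    by_cases hq :
        ((PySem.Str.splitlines (PySem.Str.strip question)).foldl pvStepA (none, [], [])).2.1 = [] <;>
      cases hst : ((PySem.Str.splitlines (PySem.Str.strip question)).foldl pvStepA (none, [], [])).1 <;>
        simp [hst, hq, List.filter_append, List.isEmpty_iff]
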